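-- pv_equiv track=rewrite | github.com/lesh23/CodingTest_Practice | HJ/Lv2.py | solution
-- ===== SOURCE A (Python) =====
-- def solution(n, left, right):
--     answer = []
--     ele=[]
--     for i in range(n):
--         ele.append([i+1]*(i+1))
--         if len(ele) < n:
--             t=i
--             x = n - len(ele)
--             while x>0:
--                 t+=1
--                 ele[i].append(t+1)
--                 x-=1
--
--     for a in ele:
--         answer+=a
--
--     answer = answer[left:right+1]
--
--     return answer
-- ===== SOURCE B (Python) =====
-- def solution(n, left, right):
--     total = n * n if n > 0 else 0
--     def clamp(i):
--         if i < 0: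
--             i += total
--         if i < 0:
--             i = 0
--         if i > total:
--             i = total
--         return i
--     lo = clamp(left)
--     hi = clamp(right + 1)
--     return [max(k // n, k % n) + 1 for k in range(lo, hi)]
-- ===== Notes on version B (the rewrite author's own statement) =====
-- stated objective: faster
-- what changed: Instead of materialising the whole n-by-n grid row by row (with an inner while loop padding each row) and then slicing the flattened list, B normalises the slice bounds once and computes each requested entry directly by the closed formula max(k//n, k%n)+1.
import Mathlib
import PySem

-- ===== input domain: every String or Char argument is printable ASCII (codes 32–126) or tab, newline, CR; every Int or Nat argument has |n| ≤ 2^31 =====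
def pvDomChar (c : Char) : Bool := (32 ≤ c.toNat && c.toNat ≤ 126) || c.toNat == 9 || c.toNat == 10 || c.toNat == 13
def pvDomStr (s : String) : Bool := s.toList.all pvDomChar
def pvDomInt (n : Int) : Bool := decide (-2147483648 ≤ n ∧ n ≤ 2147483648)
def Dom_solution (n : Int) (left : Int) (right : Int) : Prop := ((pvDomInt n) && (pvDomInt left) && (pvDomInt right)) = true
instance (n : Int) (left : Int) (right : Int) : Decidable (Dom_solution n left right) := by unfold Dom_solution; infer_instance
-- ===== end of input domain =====

-- B builds only the requested window, computing each entry by a closed formula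
-- max(k//n, k%n)+1 instead of materialising the whole n×n grid (objective: faster).

-- ===== PORT A =====
-- the inner `while x>0: t+=1; ele[i].append(t+1); x-=1` loop, acting on row = ele[i]
def fillWhile (t : Int) (x : Int) (row : List Int) : List Int :=
  if _h : 0 < x then fillWhile (t + 1) (x - 1) (row ++ [(t + 1) + 1]) else row
termination_by x.toNat
decreasing_by omega

-- one iteration of A's `for i in range(n)` body
def stepA (n : Int) (ele : List (List Int)) (i : Int) : List (List Int) :=
  let ele := ele ++ [List.replicate (i + 1).toNat (i + 1)]   -- ele.append([i+1]*(i+1))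
  if (ele.length : Int) < n then
    let t := i
    let x := n - (ele.length : Int)
    -- the while loop only mutates ele[i]; i is a valid index here (ele has i+1 rows)
    ele.set i.toNat (fillWhile t x (ele.getD i.toNat []))
  else ele

def solution (n : Int) (left : Int) (right : Int) : List Int :=
  let ele := (PySem.List.pyRange 0 n 1).foldl (stepA n) []
  let answer := ele.foldl (fun acc a => acc ++ a) []   -- for a in ele: answer += a
  PySem.List.slice answer (some left) (some (right + 1))   -- answer[left:right+1]

-- ===== PORT B =====
-- normalise a slice bound to an index into [0, total]
def clampB (total : Int) (i : Int) : Int :=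
  let i := if i < 0 then i + total else i
  let i := if i < 0 then 0 else i
  if i > total then total else i

def solution_alt (n : Int) (left : Int) (right : Int) : List Int :=
  let total := if n > 0 then n * n else 0
  let lo := clampB total left
  let hi := clampB total (right + 1)
  (PySem.List.pyRange lo hi 1).map
    (fun k => max (PySem.Int.floordiv k n) (PySem.Int.mod k n) + 1)

-- ===== PRECONDITION & SPEC =====
def Spec_solution (n : Int) (left : Int) (right : Int) (out : List Int) : Prop := out = solution_alt n left right
instance (n : Int) (left : Int) (right : Int) (out : List Int) : Decidable (Spec_solution n left right out) := by unfold Spec_solution; infer_instance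

-- ===== CLAIM (what is proved, stated in full; the proofs are below) =====
def Claim_equal_solution : Prop := ∀ (n : Int) (left : Int) (right : Int), Dom_solution n left right → Spec_solution n left right (solution n left right)

-- ===== LEMMAS AND PROOFS =====

-- row i of A's grid, in closed form
def rowA (n : Int) (m : Nat) : List Int :=
  List.replicate (m + 1) ((m : Int) + 1) ++
    (List.range (n.toNat - (m + 1))).map (fun (j : Nat) => (m : Int) + 2 + (j : Int))

-- the flattened grid entry at index k
def cellF (nN : Nat) (k : Nat) : Int := ((max (k / nN) (k % nN) : Nat) : Int) + 1

theorem fillWhile_eq (x : Nat) : ∀ (t : Int) (row : List Int),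
    fillWhile t (x : Int) row = row ++ (List.range x).map (fun (j : Nat) => t + 2 + (j : Int)) := by
  induction x with
  | zero => intro t row; simp [fillWhile]
  | succ m ih =>
    intro t row
    rw [fillWhile]
    have hx : (0 : Int) < ((m + 1 : Nat) : Int) := by exact_mod_cast Nat.succ_pos m
    rw [dif_pos hx]
    have : ((m + 1 : Nat) : Int) - 1 = (m : Int) := by push_cast; ring
    rw [this]
    rw [show ((m : Int)) = ((m : Nat) : Int) from rfl, ih]
    rw [List.range_succ_eq_map, List.map_cons, List.map_map, List.append_assoc]
    congr 1
    simp only [List.cons_append, List.nil_append]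
    congr 1
    · push_cast; ring
    · apply List.map_congr_left
      intro j _
      simp only [Function.comp_apply]
      push_cast; ring

theorem foldl_append_flatten (l : List (List Int)) : ∀ acc,
    l.foldl (fun acc a => acc ++ a) acc = acc ++ l.flatten := by
  induction l with
  | nil => intro acc; simp
  | cons h t ih => intro acc; simp [List.foldl_cons, ih, List.flatten_cons]

theorem getD_append_singleton (l : List (List Int)) (r : List Int) (p : Nat)
    (h : l.length = p) : (l ++ [r]).getD p [] = r := by
  subst h; simp [List.getD]

theorem set_append_singleton (l : List (List Int)) (r y : List Int) (p : Nat)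
    (h : l.length = p) : (l ++ [r]).set p y = l ++ [y] := by
  subst h
  rw [List.set_append_right _ _ (le_refl l.length)]
  simp

theorem stepA_loop (n : Int) : ∀ (m : Nat), (m : Int) ≤ n →
    ((List.range m).map (fun (k : Nat) => (0 : Int) + (k : Int))).foldl (stepA n) [] =
      (List.range m).map (rowA n) := by
  intro m
  induction m with
  | zero => intro _; simp
  | succ p ih =>
    intro hp
    have hp' : ((p : Nat) : Int) ≤ n := by push_cast at hp ⊢; omega
    rw [List.range_succ, List.map_append, List.foldl_append, ih hp']
    simp only [List.map_cons, List.map_nil, List.foldl_cons, List.foldl_nil]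
    rw [List.map_append, List.map_cons, List.map_nil]
    have hlen : ((List.range p).map (rowA n)).length = p := by simp
    unfold stepA
    have h2 : ((0 : Int) + (p : Int) + 1) = ((p : Int) + 1) := by ring
    have h1 : ((p : Int) + 1).toNat = p + 1 := by omega
    simp only [h2, h1]
    have hlen1 : (((List.range p).map (rowA n)) ++
        [List.replicate (p + 1) ((p : Int) + 1)]).length = p + 1 := by simp
    rw [hlen1]
    by_cases hc : ((p + 1 : Nat) : Int) < n
    · rw [if_pos (by push_cast at hc ⊢; omega)]
      have hip : ((0 : Int) + (p : Int)).toNat = p := by omega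
      rw [hip]
      rw [getD_append_singleton _ _ _ hlen, set_append_singleton _ _ _ _ hlen]
      have hx : n - ((p + 1 : Nat) : Int) = ((n.toNat - (p + 1) : Nat) : Int) := by
        push_cast at hc; omega
      rw [hx, show ((0 : Int) + (p : Int)) = ((p : Nat) : Int) from by ring,
        fillWhile_eq]
      simp only [rowA]
    · rw [if_neg (by push_cast at hc ⊢; omega)]
      have hpn : p + 1 = n.toNat := by push_cast at hc hp; omega
      simp only [rowA, ← hpn, Nat.sub_self, List.range_zero, List.map_nil, List.append_nil]

theorem rowA_eq (n : Int) (nN : Nat) (hn : n.toNat = nN) (m : Nat) (hm : m < nN) :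
    rowA n m = (List.range nN).map (fun j => cellF nN (m * nN + j)) := by
  have hn0 : 0 < nN := by omega
  apply List.ext_getElem
  · simp [rowA, hn]; omega
  intro i h1 h2
  have hi : i < nN := by simpa using h2
  have hdiv : (m * nN + i) / nN = m := by
    rw [Nat.mul_comm, Nat.mul_add_div hn0, Nat.div_eq_of_lt hi]; omega
  have hmod : (m * nN + i) % nN = i := by
    rw [Nat.mul_comm, Nat.mul_add_mod, Nat.mod_eq_of_lt hi]
  simp only [List.getElem_map, List.getElem_range, cellF, hdiv, hmod]
  simp only [rowA, List.getElem_append]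
  split_ifs with h
  · simp only [List.getElem_replicate]
    have : max m i = m := by simp at h; omega
    rw [this]
  · simp only [List.getElem_map, List.getElem_range, List.length_replicate]
    have hgt : m < i := by simp at h; omega
    have : max m i = i := by omega
    rw [this]
    omega

theorem flatten_rows (n : Int) (nN : Nat) (hn : n.toNat = nN) : ∀ (m : Nat), m ≤ nN →
    ((List.range m).map (rowA n)).flatten = (List.range (m * nN)).map (cellF nN) := by
  intro m
  induction m with
  | zero => intro _; simp
  | succ p ih =>
    intro hp
    rw [List.range_succ, List.map_append, List.flatten_append]
    rw [ih (by omega)]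
    simp only [List.map_cons, List.map_nil, List.flatten_cons, List.flatten_nil, List.append_nil]
    rw [rowA_eq n nN hn p (by omega)]
    rw [show (p + 1) * nN = p * nN + nN by ring, List.range_add, List.map_append]
    congr 1
    simp [List.map_map, Function.comp]

theorem clampB_eq (nN : Nat) (x : Int) :
    clampB ((nN : Nat) : Int) x = ((PySem.List.clampIdx nN x : Nat) : Int) := by
  simp only [clampB, PySem.List.clampIdx]
  split_ifs <;> omega

theorem slice_map_range (f : Nat → Int) (T : Nat) (a b : Int) (g : Int → Int)
    (hg : ∀ k : Nat, k < T → g (k : Int) = f k) :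
    PySem.List.slice ((List.range T).map f) (some a) (some b) =
      (PySem.List.pyRange ((PySem.List.clampIdx T a : Nat) : Int)
        ((PySem.List.clampIdx T b : Nat) : Int) 1).map g := by
  have ha : PySem.List.clampIdx T a ≤ T := PySem.List.clampIdx_le T a
  have hb : PySem.List.clampIdx T b ≤ T := PySem.List.clampIdx_le T b
  apply List.ext_getElem
  · rw [PySem.List.length_slice, PySem.List.pyRange_one]
    simp only [List.length_map, List.length_range]
    omega
  intro k h1 h2
  have hk : k < PySem.List.clampIdx T b - PySem.List.clampIdx T a := by
    rw [PySem.List.length_slice] at h1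
    simpa using h1
  have hk2 : PySem.List.clampIdx T a + k < T := by omega
  simp only [PySem.List.slice, List.length_map, List.length_range, List.getElem_take,
    List.getElem_drop, List.getElem_map, PySem.List.getElem_pyRange_one, List.getElem_range]
  rw [show ((PySem.List.clampIdx T a : Nat) : Int) + (k : Int) =
        ((PySem.List.clampIdx T a + k : Nat) : Int) from by push_cast; ring]
  rw [hg _ hk2]

theorem solution_spec_core (n left right : Int) :
    solution n left right = solution_alt n left right := by
  unfold solution solution_alt
  dsimp only
  by_cases hn : 0 < n
  · obtain ⟨nN, rfl⟩ : ∃ m : Nat, n = (m : Int) := ⟨n.toNat, by omega⟩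
    rw [if_pos hn]
    have hN : ((nN : Int)).toNat = nN := Int.toNat_natCast nN
    have hr : PySem.List.pyRange 0 (nN : Int) 1 =
        (List.range nN).map (fun (k : Nat) => (0 : Int) + (k : Int)) := by
      rw [PySem.List.pyRange_one]
      norm_num
    rw [hr, stepA_loop (nN : Int) nN le_rfl, foldl_append_flatten, List.nil_append]
    rw [show ((List.range nN).map (rowA (nN : Int))).flatten =
          (List.range (nN * nN)).map (cellF nN) from
        flatten_rows (nN : Int) nN hN nN le_rfl]
    rw [show ((nN : Int)) * (nN : Int) = ((nN * nN : Nat) : Int) from by push_cast; ring]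
    rw [clampB_eq, clampB_eq]
    rw [slice_map_range (cellF nN) (nN * nN) left (right + 1)
      (fun k => max (PySem.Int.floordiv k (nN : Int)) (PySem.Int.mod k (nN : Int)) + 1)
      (by
        intro k hk
        simp only [cellF, PySem.Int.floordiv_natCast, PySem.Int.mod_natCast, Nat.cast_max])]
  · rw [if_neg hn]
    have h0 : PySem.List.pyRange 0 n 1 = [] := by
      rw [PySem.List.pyRange_one]
      rw [show (n - 0).toNat = 0 from by omega]
      simp
    rw [h0]
    simp only [List.foldl_nil]
    have hc : ∀ x : Int, clampB 0 x = 0 := by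
      intro x
      simp only [clampB]
      split_ifs <;> omega
    rw [hc, hc, PySem.List.pyRange_one]
    simp [PySem.List.slice]

-- ===== VERDICT (by name: the statement is the Claim_ definition above) =====
theorem solution_spec : Claim_equal_solution := by
  intro n left right _
  unfold Spec_solution
  exact solution_spec_core n left right
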